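-- pv_equiv track=rewrite | github.com/JinSon12/AlgorithmsPractice | InterviewPractice_Medium/JUL_20_132Pattern.py | find132pattern_oN2
-- ===== SOURCE A (Python) =====
-- from typing import List
--
-- def find132pattern_oN2(nums: List[int]) -> bool:
--     for i in range(len(nums)):
--         sec = nums[i]
--         for j in range(i, len(nums)):
--             if nums[i] < nums[j]:
--                 if nums[j] < sec:
--                     return True
--                 elif nums[j] > sec:
--                     sec = nums[j]
-- ===== SOURCE B (Python) =====
-- from typing import List
--
-- def find132pattern_oN2(nums: List[int]) -> bool:
--     # Monotonic stack, scanning right-to-left: `third` is the best "3rd" value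
--     # seen so far (one that has a larger element to its left), `stack` holds
--     # candidate "2nd" values in nondecreasing order from the top.
--     third = None
--     stack = []
--     for n in reversed(nums):
--         if third is not None and n < third:
--             return True
--         while stack and stack[-1] < n:
--             third = stack.pop()
--         stack.append(n)
-- ===== Notes on version B (the rewrite author's own statement) =====
-- stated objective: faster
-- what changed: Replaced the quadratic double scan (for each i, rescan the suffix maintaining a running max) by a single right-to-left pass with a monotonic stack tracking the best 'third' candidate; Pre_ excludes inputs with no 132 pattern, on which both Pythons fall off their loops and return None instead of a bool.
-- outside the precondition, e.g. on find132pattern_oN2([]): A returns None, B returns None; on find132pattern_oN2([1, 2, 3]): A returns None, B returns None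
import Mathlib
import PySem

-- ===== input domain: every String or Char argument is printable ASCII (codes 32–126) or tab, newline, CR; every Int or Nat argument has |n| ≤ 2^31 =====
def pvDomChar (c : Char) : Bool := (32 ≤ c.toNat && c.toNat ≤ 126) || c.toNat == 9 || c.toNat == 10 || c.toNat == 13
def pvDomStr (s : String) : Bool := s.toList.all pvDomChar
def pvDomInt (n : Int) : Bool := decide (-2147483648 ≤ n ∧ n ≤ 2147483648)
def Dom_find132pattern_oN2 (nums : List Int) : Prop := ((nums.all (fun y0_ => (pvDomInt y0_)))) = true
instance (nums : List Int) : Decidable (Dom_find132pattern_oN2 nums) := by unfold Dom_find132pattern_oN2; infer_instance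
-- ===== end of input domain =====

-- B replaces A's quadratic double scan by a single right-to-left pass with a monotonic
-- stack (objective: faster, O(n^2) → O(n)).  When no pattern exists both Pythons fall
-- off their loops and return None (falsy, outside Pre_); the ports return `false` there.

-- ===== PORT A =====
-- inner loop `for j in range(i, len(nums))` over the suffix, with running `sec`
def innerA (ni sec : Int) : List Int → Bool
  | [] => false
  | nj :: rest =>
    if ni < nj then
      if nj < sec then true
      else if sec < nj then innerA ni nj rest
      else innerA ni sec rest
    else innerA ni sec rest

-- outer loop `for i in range(len(nums))`: sec = nums[i], inner scan starts at j = i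
def find132pattern_oN2 : List Int → Bool
  | [] => false
  | a :: rest => if innerA a a (a :: rest) then true else find132pattern_oN2 rest

-- ===== PORT B =====
-- `while stack and stack[-1] < n: third = stack.pop()`
def popLoopB (n : Int) : List Int → Option Int → Option Int × List Int
  | [], third => (third, [])
  | s :: rest, third => if s < n then popLoopB n rest (some s) else (third, s :: rest)

-- `for n in reversed(nums): ...`
def goB : List Int → List Int → Option Int → Bool
  | [], _, _ => false
  | n :: l, stack, third =>
    if (match third with | some t => decide (n < t) | none => false) then true
    else
      let p := popLoopB n stack third
      goB l (n :: p.2) p.1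

def find132pattern_oN2_alt (nums : List Int) : Bool := goB nums.reverse [] none

-- ===== PRECONDITION & SPEC =====
-- Pre_ excludes exactly the inputs containing no 132 pattern: there both Pythons fall
-- off their loops and return None instead of a bool.
def Pre_find132pattern_oN2 (nums : List Int) : Prop :=
  ∃ k, k < nums.length ∧ ∃ j, j < k ∧ ∃ i, i < j ∧
    nums.getD i 0 < nums.getD k 0 ∧ nums.getD k 0 < nums.getD j 0
instance (nums : List Int) : Decidable (Pre_find132pattern_oN2 nums) := by
  unfold Pre_find132pattern_oN2; infer_instance

def pvWitness_find132pattern_oN2 : List Int := [1, 3, 2]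

def Spec_find132pattern_oN2 (nums : List Int) (out : Bool) : Prop := out = find132pattern_oN2_alt nums
instance (nums : List Int) (out : Bool) : Decidable (Spec_find132pattern_oN2 nums out) := by unfold Spec_find132pattern_oN2; infer_instance

-- ===== CLAIM (what is proved, stated in full; the proofs are below) =====
def Claim_equal_find132pattern_oN2 : Prop := ∀ (nums : List Int), Dom_find132pattern_oN2 nums → Pre_find132pattern_oN2 nums → Spec_find132pattern_oN2 nums (find132pattern_oN2 nums)

-- ===== LEMMAS AND PROOFS =====

-- the specification both programs decide: a 132 pattern exists in the list
def Pat (l : List Int) : Prop := ∃ a b c : Int, a < c ∧ c < b ∧ List.Sublist [a, b, c] l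

-- characterisation of A's inner loop
theorem innerA_iff (l : List Int) : ∀ (ni sec : Int),
    (innerA ni sec l = true ↔
      ∃ c, ni < c ∧ ((c ∈ l ∧ c < sec) ∨ ∃ b, c < b ∧ List.Sublist [b, c] l)) := by
  induction l with
  | nil => intro ni sec; simp [innerA]
  | cons nj rest ih =>
    intro ni sec
    by_cases h1 : ni < nj
    · by_cases h2 : nj < sec
      · simp only [innerA, if_pos h1, if_pos h2]
        exact ⟨fun _ => ⟨nj, h1, Or.inl ⟨List.mem_cons_self, h2⟩⟩, fun _ => trivial⟩
      · by_cases h3 : sec < nj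
        · rw [show innerA ni sec (nj :: rest) = innerA ni nj rest by
            simp [innerA, h1, h2, h3]]
          rw [ih ni nj]
          constructor
          · rintro ⟨c, hc, ⟨hm, hlt⟩ | ⟨b, hb, hs⟩⟩
            · exact ⟨c, hc, Or.inr ⟨nj, hlt, (List.singleton_sublist.mpr hm).cons₂ _⟩⟩
            · exact ⟨c, hc, Or.inr ⟨b, hb, hs.cons _⟩⟩
          · rintro ⟨c, hc, ⟨hm, hlt⟩ | ⟨b, hb, hs⟩⟩
            · rcases List.mem_cons.mp hm with rfl | hm'
              · exact absurd hlt h2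
              · exact ⟨c, hc, Or.inl ⟨hm', lt_trans hlt h3⟩⟩
            · rcases List.sublist_cons_iff.mp hs with hs' | ⟨r, hr, hrs⟩
              · exact ⟨c, hc, Or.inr ⟨b, hb, hs'⟩⟩
              · injection hr with hbnj hrc
                subst hbnj
                rw [← hrc] at hrs
                exact ⟨c, hc, Or.inl ⟨List.singleton_sublist.mp hrs, hb⟩⟩
        · have hsec : sec = nj := le_antisymm (not_lt.mp h2) (not_lt.mp h3)
          rw [show innerA ni sec (nj :: rest) = innerA ni sec rest by
            simp [innerA, h1, h2, h3]]
          rw [ih ni sec]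
          constructor
          · rintro ⟨c, hc, ⟨hm, hlt⟩ | ⟨b, hb, hs⟩⟩
            · exact ⟨c, hc, Or.inl ⟨List.mem_cons_of_mem _ hm, hlt⟩⟩
            · exact ⟨c, hc, Or.inr ⟨b, hb, hs.cons _⟩⟩
          · rintro ⟨c, hc, ⟨hm, hlt⟩ | ⟨b, hb, hs⟩⟩
            · rcases List.mem_cons.mp hm with rfl | hm'
              · exact absurd hlt (by rw [hsec]; exact lt_irrefl _)
              · exact ⟨c, hc, Or.inl ⟨hm', hlt⟩⟩
            · rcases List.sublist_cons_iff.mp hs with hs' | ⟨r, hr, hrs⟩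
              · exact ⟨c, hc, Or.inr ⟨b, hb, hs'⟩⟩
              · injection hr with hbnj hrc
                subst hbnj
                rw [← hrc] at hrs
                exact ⟨c, hc, Or.inl ⟨List.singleton_sublist.mp hrs, hsec ▸ hb⟩⟩
    · rw [show innerA ni sec (nj :: rest) = innerA ni sec rest by simp [innerA, h1]]
      rw [ih ni sec]
      constructor
      · rintro ⟨c, hc, ⟨hm, hlt⟩ | ⟨b, hb, hs⟩⟩
        · exact ⟨c, hc, Or.inl ⟨List.mem_cons_of_mem _ hm, hlt⟩⟩
        · exact ⟨c, hc, Or.inr ⟨b, hb, hs.cons _⟩⟩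
      · rintro ⟨c, hc, ⟨hm, hlt⟩ | ⟨b, hb, hs⟩⟩
        · rcases List.mem_cons.mp hm with rfl | hm'
          · exact absurd hc h1
          · exact ⟨c, hc, Or.inl ⟨hm', hlt⟩⟩
        · rcases List.sublist_cons_iff.mp hs with hs' | ⟨r, hr, hrs⟩
          · exact ⟨c, hc, Or.inr ⟨b, hb, hs'⟩⟩
          · injection hr with hbnj hrc
            subst hbnj
            exact absurd (lt_trans hc hb) h1

-- characterisation of A
theorem find132_iff_Pat (l : List Int) : find132pattern_oN2 l = true ↔ Pat l := by
  induction l with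
  | nil => simp [find132pattern_oN2, Pat]
  | cons a rest ih =>
    have hhead : innerA a a (a :: rest) = true ↔
        ∃ b c : Int, a < c ∧ c < b ∧ List.Sublist [b, c] rest := by
      rw [innerA_iff]
      constructor
      · rintro ⟨c, hc, ⟨_, hlt⟩ | ⟨b, hb, hs⟩⟩
        · exact absurd (lt_trans hc hlt) (lt_irrefl a)
        · rcases List.sublist_cons_iff.mp hs with hs' | ⟨r, hr, hrs⟩
          · exact ⟨b, c, hc, hb, hs'⟩
          · injection hr with hba hrc
            subst hba
            exact absurd (lt_trans hc hb) (lt_irrefl _)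
      · rintro ⟨b, c, hc, hb, hs⟩
        exact ⟨c, hc, Or.inr ⟨b, hb, hs.cons _⟩⟩
    have hPat : Pat (a :: rest) ↔
        (∃ b c : Int, a < c ∧ c < b ∧ List.Sublist [b, c] rest) ∨ Pat rest := by
      constructor
      · rintro ⟨x, b, c, hxc, hcb, hs⟩
        rcases List.sublist_cons_iff.mp hs with hs' | ⟨r, hr, hrs⟩
        · exact Or.inr ⟨x, b, c, hxc, hcb, hs'⟩
        · injection hr with hxa hrc
          subst hxa
          rw [← hrc] at hrs
          exact Or.inl ⟨b, c, hxc, hcb, hrs⟩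
      · rintro (⟨b, c, hc, hb, hs⟩ | ⟨x, b, c, hxc, hcb, hs⟩)
        · exact ⟨a, b, c, hc, hb, hs.cons₂ _⟩
        · exact ⟨x, b, c, hxc, hcb, hs.cons _⟩
    rw [show find132pattern_oN2 (a :: rest) =
        (if innerA a a (a :: rest) then true else find132pattern_oN2 rest) from rfl]
    by_cases h : innerA a a (a :: rest) = true
    · simp only [h, if_true]
      exact ⟨fun _ => hPat.mpr (Or.inl (hhead.mp h)), fun _ => trivial⟩
    · simp only [Bool.not_eq_true] at h
      simp only [h, Bool.false_eq_true, if_false]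
      rw [ih, hPat]
      have hno : ¬ ∃ b c : Int, a < c ∧ c < b ∧ List.Sublist [b, c] rest := fun hx =>
        by simp [hhead.mpr hx] at h
      constructor
      · exact Or.inr
      · rintro (hx | hp)
        · exact absurd hx hno
        · exact hp

-- invariant of B's scan between outer-loop iterations; R is the already-processed suffix
def InvB (R stack : List Int) (third : Option Int) : Prop :=
  List.Sublist stack R ∧ stack.Pairwise (· ≤ ·) ∧
  (∀ t, third = some t → ∃ b, t < b ∧ List.Sublist [b, t] R) ∧
  (∀ b c, c < b → List.Sublist [b, c] R → ∃ t, third = some t ∧ c ≤ t) ∧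
  (∀ x ∈ R, x ∈ stack ∨ ∃ t, third = some t ∧ x ≤ t) ∧
  (∀ t, third = some t → ∀ x ∈ stack, t ≤ x)

-- invariant of B's inner pop loop while processing element n
def JB (R : List Int) (n : Int) (stack : List Int) (third : Option Int) : Prop :=
  List.Sublist stack R ∧ stack.Pairwise (· ≤ ·) ∧
  (∀ t, third = some t → t ≤ n ∧ ((∃ b, t < b ∧ List.Sublist [b, t] R) ∨ (t ∈ R ∧ t < n))) ∧
  (∀ b c, c < b → List.Sublist [b, c] R → ∃ t, third = some t ∧ c ≤ t) ∧
  (∀ x ∈ R, x ∈ stack ∨ ∃ t, third = some t ∧ x ≤ t) ∧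
  (∀ t, third = some t → ∀ x ∈ stack, t ≤ x)

theorem popLoopB_J (R : List Int) (n : Int) : ∀ (stack : List Int) (third : Option Int),
    JB R n stack third →
    JB R n (popLoopB n stack third).2 (popLoopB n stack third).1 ∧
      ∀ x ∈ (popLoopB n stack third).2, n ≤ x := by
  intro stack
  induction stack with
  | nil => intro third hJ; exact ⟨hJ, by simp [popLoopB]⟩
  | cons s rest ih =>
    intro third hJ
    obtain ⟨hsub, hpw, hsound, hcand, hcover, hle⟩ := hJ
    by_cases hs : s < n
    · rw [show popLoopB n (s :: rest) third = popLoopB n rest (some s) by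
        simp [popLoopB, hs]]
      apply ih
      have hsR : s ∈ R := hsub.subset List.mem_cons_self
      have hrest : List.Sublist rest R := (List.sublist_cons_self s rest).trans hsub
      have hpw' := List.pairwise_cons.mp hpw
      refine ⟨hrest, hpw'.2, ?_, ?_, ?_, ?_⟩
      · intro t ht
        injection ht with ht
        subst ht
        exact ⟨le_of_lt hs, Or.inr ⟨hsR, hs⟩⟩
      · intro b c hcb hbc
        obtain ⟨t, htt, hct⟩ := hcand b c hcb hbc
        exact ⟨s, rfl, le_trans hct (hle t htt s List.mem_cons_self)⟩
      · intro x hx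
        rcases hcover x hx with hxs | ⟨t, htt, hxt⟩
        · rcases List.mem_cons.mp hxs with rfl | hx'
          · exact Or.inr ⟨x, rfl, le_refl _⟩
          · exact Or.inl hx'
        · exact Or.inr ⟨s, rfl, le_trans hxt (hle t htt s List.mem_cons_self)⟩
      · intro t ht x hx
        injection ht with ht
        subst ht
        exact hpw'.1 x hx
    · rw [show popLoopB n (s :: rest) third = (third, s :: rest) by simp [popLoopB, hs]]
      refine ⟨⟨hsub, hpw, hsound, hcand, hcover, hle⟩, ?_⟩
      intro x hx
      rcases List.mem_cons.mp hx with rfl | hx'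
      · exact not_lt.mp hs
      · exact le_trans (not_lt.mp hs) ((List.pairwise_cons.mp hpw).1 x hx')

theorem step_Inv (R stack : List Int) (third : Option Int) (n : Int)
    (hInv : InvB R stack third) (hNoTrig : ∀ t, third = some t → ¬ n < t) :
    InvB (n :: R) (n :: (popLoopB n stack third).2) (popLoopB n stack third).1 := by
  have hJ0 : JB R n stack third := by
    obtain ⟨h1, h2, h3, h4, h5, h6⟩ := hInv
    exact ⟨h1, h2, fun t ht => ⟨not_lt.mp (hNoTrig t ht), Or.inl (h3 t ht)⟩, h4, h5, h6⟩
  obtain ⟨⟨h1, h2, h3, h4, h5, h6⟩, hge⟩ := popLoopB_J R n stack third hJ0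
  refine ⟨h1.cons₂ _, List.pairwise_cons.mpr ⟨hge, h2⟩, ?_, ?_, ?_, ?_⟩
  · intro t ht
    obtain ⟨htn, hcase⟩ := h3 t ht
    rcases hcase with ⟨b, hb, hsB⟩ | ⟨htR, htn'⟩
    · exact ⟨b, hb, hsB.cons _⟩
    · exact ⟨n, htn', (List.singleton_sublist.mpr htR).cons₂ _⟩
  · intro b c hcb hbc
    rcases List.sublist_cons_iff.mp hbc with hs' | ⟨r, hr, hrs⟩
    · exact h4 b c hcb hs'
    · injection hr with hbn hrc
      subst hbn
      rw [← hrc] at hrs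
      have hcR : c ∈ R := List.singleton_sublist.mp hrs
      rcases h5 c hcR with hcs | hct
      · exact absurd hcb (not_lt.mpr (hge c hcs))
      · exact hct
  · intro x hx
    rcases List.mem_cons.mp hx with rfl | hxR
    · exact Or.inl List.mem_cons_self
    · rcases h5 x hxR with hxs | hxt
      · exact Or.inl (List.mem_cons_of_mem _ hxs)
      · exact Or.inr hxt
  · intro t ht x hx
    rcases List.mem_cons.mp hx with rfl | hx'
    · exact (h3 t ht).1
    · exact h6 t ht x hx'

theorem goB_iff : ∀ (l R stack : List Int) (third : Option Int), InvB R stack third →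
    (goB l stack third = true ↔
      ∃ u a v, l = u ++ a :: v ∧ ∃ b c : Int, a < c ∧ c < b ∧ List.Sublist [b, c] (u.reverse ++ R)) := by
  intro l
  induction l with
  | nil =>
    intro R stack third _
    simp only [goB, Bool.false_eq_true, false_iff]
    rintro ⟨u, a, v, h, -⟩
    exact absurd h.symm (List.append_ne_nil_of_right_ne_nil u (List.cons_ne_nil a v))
  | cons m l ih =>
    intro R stack third hInv
    by_cases htr : ∃ t, third = some t ∧ m < t
    · obtain ⟨t, ht, hmt⟩ := htr
      rw [show goB (m :: l) stack third = true by simp [goB, ht, hmt]]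
      constructor
      · intro _
        obtain ⟨b, hb, hsB⟩ := hInv.2.2.1 t ht
        exact ⟨[], m, l, rfl, b, t, hmt, hb, by simpa using hsB⟩
      · intro _; rfl
    · have hNo : ∀ t, third = some t → ¬ m < t := fun t ht hmt => htr ⟨t, ht, hmt⟩
      rw [show goB (m :: l) stack third
            = goB l (m :: (popLoopB m stack third).2) (popLoopB m stack third).1 by
          cases third with
          | none => simp [goB]
          | some t => simp [goB, hNo t rfl]]
      rw [ih (m :: R) _ _ (step_Inv R stack third m hInv hNo)]
      constructor
      · rintro ⟨u, a, v, hl, b, c, hac, hcb, hs⟩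
        refine ⟨m :: u, a, v, by rw [hl]; rfl, b, c, hac, hcb, ?_⟩
        simpa [List.reverse_cons, List.append_assoc] using hs
      · rintro ⟨u, a, v, hl, b, c, hac, hcb, hs⟩
        cases u with
        | nil =>
          simp only [List.nil_append] at hl
          injection hl with h0 h1
          subst h0
          rw [List.reverse_nil, List.nil_append] at hs
          obtain ⟨t, ht, hct⟩ := hInv.2.2.2.1 b c hcb hs
          exact absurd (lt_of_lt_of_le hac hct) (hNo t ht)
        | cons u0 u' =>
          rw [List.cons_append] at hl
          injection hl with h0 h1
          subst h0
          exact ⟨u', a, v, h1, b, c, hac, hcb, by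
            simpa [List.reverse_cons, List.append_assoc] using hs⟩

theorem alt_iff_Pat (nums : List Int) : find132pattern_oN2_alt nums = true ↔ Pat nums := by
  have h0 : InvB [] [] none := by
    refine ⟨List.nil_sublist _, List.Pairwise.nil, by simp, ?_, by simp, by simp⟩
    intro b c _ hbc
    exact absurd (List.eq_nil_of_sublist_nil hbc) (by simp)
  rw [find132pattern_oN2_alt, goB_iff nums.reverse [] [] none h0]
  constructor
  · rintro ⟨u, a, v, hrev, b, c, hac, hcb, hs⟩
    rw [List.append_nil] at hs
    have hnums : nums = v.reverse ++ a :: u.reverse := by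
      have h := congrArg List.reverse hrev
      simpa [List.reverse_append] using h
    refine ⟨a, b, c, hac, hcb, ?_⟩
    rw [hnums]
    exact (hs.cons₂ a).trans (List.sublist_append_right v.reverse (a :: u.reverse))
  · rintro ⟨a, b, c, hac, hcb, hs⟩
    obtain ⟨r₁, r₂, hn, haR, hbc⟩ := List.cons_sublist_iff.mp hs
    obtain ⟨X, Z, hr1⟩ := List.append_of_mem haR
    refine ⟨r₂.reverse ++ Z.reverse, a, X.reverse, ?_, b, c, hac, hcb, ?_⟩
    · rw [hn, hr1]
      simp [List.reverse_append, List.append_assoc]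
    · rw [List.append_nil, List.reverse_append, List.reverse_reverse, List.reverse_reverse]
      exact hbc.trans (List.sublist_append_right Z r₂)

-- getD-index characterisation of 1-, 2- and 3-element sublists (links Pre_ to Pat)
theorem getD_single_sublist : ∀ (l : List Int) (i : Nat), i < l.length →
    List.Sublist [l.getD i 0] l := by
  intro l
  induction l with
  | nil => intro i h; simp at h
  | cons x rest ih =>
    intro i h
    cases i with
    | zero => exact (List.nil_sublist rest).cons₂ x
    | succ i' =>
      simp only [List.getD_cons_succ]
      exact (ih i' (by simpa using h)).cons x

theorem getD_pair_sublist : ∀ (l : List Int) (j k : Nat), j < k → k < l.length →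
    List.Sublist [l.getD j 0, l.getD k 0] l := by
  intro l
  induction l with
  | nil => intro j k _ h; simp at h
  | cons x rest ih =>
    intro j k hjk hk
    cases j with
    | zero =>
      cases k with
      | zero => exact absurd hjk (lt_irrefl _)
      | succ k' =>
        simp only [List.getD_cons_zero, List.getD_cons_succ]
        exact (getD_single_sublist rest k' (by simpa using hk)).cons₂ x
    | succ j' =>
      cases k with
      | zero => exact absurd hjk (by omega)
      | succ k' =>
        simp only [List.getD_cons_succ]
        exact (ih j' k' (by omega) (by simpa using hk)).cons x

theorem getD_triple_sublist : ∀ (l : List Int) (i j k : Nat), i < j → j < k →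
    k < l.length →
    List.Sublist [l.getD i 0, l.getD j 0, l.getD k 0] l := by
  intro l
  induction l with
  | nil => intro i j k _ _ h; simp at h
  | cons x rest ih =>
    intro i j k hij hjk hk
    cases i with
    | zero =>
      cases j with
      | zero => exact absurd hij (lt_irrefl _)
      | succ j' =>
        cases k with
        | zero => exact absurd hjk (by omega)
        | succ k' =>
          simp only [List.getD_cons_zero, List.getD_cons_succ]
          exact (getD_pair_sublist rest j' k' (by omega) (by simpa using hk)).cons₂ x
    | succ i' =>
      cases j with
      | zero => exact absurd hij (by omega)
      | succ j' =>
        cases k with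
        | zero => exact absurd hjk (by omega)
        | succ k' =>
          simp only [List.getD_cons_succ]
          exact (ih i' j' k' (by omega) (by omega) (by simpa using hk)).cons x

theorem sublist_single_getD : ∀ (l : List Int) (a : Int), List.Sublist [a] l →
    ∃ i, i < l.length ∧ l.getD i 0 = a := by
  intro l
  induction l with
  | nil => intro a h; exact absurd (List.eq_nil_of_sublist_nil h) (by simp)
  | cons x rest ih =>
    intro a h
    rcases List.sublist_cons_iff.mp h with h' | ⟨r, hr, hrs⟩
    · obtain ⟨i, hi, he⟩ := ih a h'
      exact ⟨i + 1, by simpa using hi, by simpa using he⟩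
    · injection hr with hax _
      exact ⟨0, by simp, hax.symm⟩

theorem sublist_pair_getD : ∀ (l : List Int) (b c : Int), List.Sublist [b, c] l →
    ∃ j k, j < k ∧ k < l.length ∧ l.getD j 0 = b ∧ l.getD k 0 = c := by
  intro l
  induction l with
  | nil => intro b c h; exact absurd (List.eq_nil_of_sublist_nil h) (by simp)
  | cons x rest ih =>
    intro b c h
    rcases List.sublist_cons_iff.mp h with h' | ⟨r, hr, hrs⟩
    · obtain ⟨j, k, hjk, hk, hb, hc⟩ := ih b c h'
      exact ⟨j + 1, k + 1, by omega, by simpa using hk, by simpa using hb,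
        by simpa using hc⟩
    · injection hr with hbx hrc
      rw [← hrc] at hrs
      obtain ⟨k, hk, hc⟩ := sublist_single_getD rest c hrs
      exact ⟨0, k + 1, by omega, by simpa using hk, hbx.symm, by simpa using hc⟩

theorem sublist_triple_getD : ∀ (l : List Int) (a b c : Int), List.Sublist [a, b, c] l →
    ∃ i j k, i < j ∧ j < k ∧ k < l.length ∧
      l.getD i 0 = a ∧ l.getD j 0 = b ∧ l.getD k 0 = c := by
  intro l
  induction l with
  | nil => intro a b c h; exact absurd (List.eq_nil_of_sublist_nil h) (by simp)
  | cons x rest ih =>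
    intro a b c h
    rcases List.sublist_cons_iff.mp h with h' | ⟨r, hr, hrs⟩
    · obtain ⟨i, j, k, hij, hjk, hk, ha, hb, hc⟩ := ih a b c h'
      exact ⟨i + 1, j + 1, k + 1, by omega, by omega, by simpa using hk,
        by simpa using ha, by simpa using hb, by simpa using hc⟩
    · injection hr with hax hrc
      rw [← hrc] at hrs
      obtain ⟨j, k, hjk, hk, hb, hc⟩ := sublist_pair_getD rest b c hrs
      exact ⟨0, j + 1, k + 1, by omega, by omega, by simpa using hk, hax.symm,
        by simpa using hb, by simpa using hc⟩

theorem Pre_iff_Pat (nums : List Int) : Pre_find132pattern_oN2 nums ↔ Pat nums := by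
  constructor
  · rintro ⟨k, hk, j, hjk, i, hij, h1, h2⟩
    exact ⟨nums.getD i 0, nums.getD j 0, nums.getD k 0, h1, h2,
      getD_triple_sublist nums i j k hij hjk hk⟩
  · rintro ⟨a, b, c, hac, hcb, hs⟩
    obtain ⟨i, j, k, hij, hjk, hk, ha, hb, hc⟩ := sublist_triple_getD nums a b c hs
    exact ⟨k, hk, j, hjk, i, hij, by rw [ha, hc]; exact hac, by rw [hb, hc]; exact hcb⟩

-- ===== VERDICT (by name: the statement is the Claim_ definition above) =====
theorem find132pattern_oN2_spec : Claim_equal_find132pattern_oN2 := by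
  intro nums _ hpre
  unfold Spec_find132pattern_oN2
  have hp : Pat nums := (Pre_iff_Pat nums).mp hpre
  rw [(find132_iff_Pat nums).mpr hp, (alt_iff_Pat nums).mpr hp]
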